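-- pv_equiv track=rewrite | github.com/Rehanair08/Biology-and-Ethics- | Gene Stability Prediction.py | check_repetitive_patterns
-- ===== SOURCE A (Python) =====
-- def check_repetitive_patterns(sequence, min_repeat_length=6):
--     """Check for repetitive patterns in the sequence."""
--     sequence = sequence.upper()
--     length = len(sequence)
--     repeat_score = 0
--     for i in range(length - min_repeat_length + 1):
--         substring = sequence[i:i + min_repeat_length]
--         occurrences = sequence.count(substring)
--         if occurrences > 1:
--             repeat_score += occurrences - 1
--     return repeat_score > 5  # True if highly repetitive
-- ===== SOURCE B (Python) =====
-- def check_repetitive_patterns(sequence, min_repeat_length=6):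
--     """Check for repetitive patterns by grouping equal windows into a
--     position index, then counting non-overlapping occurrences per group
--     greedily from the sorted positions (no str.count scans)."""
--     sequence = sequence.upper()
--     n = len(sequence)
--     m = min_repeat_length
--     pos = {}
--     for i in range(n - m + 1):
--         pos.setdefault(sequence[i:i + m], []).append(i)
--     score = 0
--     for ps in pos.values():
--         c = 0
--         nxt = 0
--         for p in ps:
--             if p >= nxt:
--                 c += 1
--                 nxt = p + m
--         score += len(ps) * (c - 1)
--     return score > 5
-- ===== Notes on version B (the rewrite author's own statement) =====
-- stated objective: faster
-- what changed: B never calls str.count: it builds a window->positions index in one pass and computes each distinct window's non-overlapping occurrence count greedily from its sorted positions, adding multiplicity*(count-1) per group; Pre_ restricts to the natural domain of nonnegative pattern lengths.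
-- outside the precondition, e.g. on check_repetitive_patterns('A', -1): A returns False, B returns True
import Mathlib
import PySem

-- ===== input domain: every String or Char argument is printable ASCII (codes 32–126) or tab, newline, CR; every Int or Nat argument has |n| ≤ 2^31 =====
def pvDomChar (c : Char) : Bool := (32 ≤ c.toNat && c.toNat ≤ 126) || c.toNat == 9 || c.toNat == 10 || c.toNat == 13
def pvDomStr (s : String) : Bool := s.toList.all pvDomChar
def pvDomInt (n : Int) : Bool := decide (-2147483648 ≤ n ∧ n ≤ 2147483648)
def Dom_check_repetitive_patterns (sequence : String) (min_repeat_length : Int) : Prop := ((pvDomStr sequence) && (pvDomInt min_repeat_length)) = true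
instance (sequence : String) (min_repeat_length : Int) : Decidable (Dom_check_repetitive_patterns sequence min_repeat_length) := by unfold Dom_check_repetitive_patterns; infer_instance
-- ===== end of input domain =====

-- B replaces A's per-position str.count scans by a window→positions index plus a greedy
-- non-overlapping count per distinct window (faster: one indexing pass instead of a scan per position).

-- ===== PORT A =====
def check_repetitive_patterns (sequence : String) (min_repeat_length : Int) : Bool :=
  let s := PySem.Str.upper sequence
  let length := PySem.Str.len s
  let repeat_score : Int :=
    (PySem.List.pyRange 0 (length - min_repeat_length + 1) 1).foldl
      (fun repeat_score i =>
        let substring := PySem.Str.slice s (some i) (some (i + min_repeat_length))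
        let occurrences : Int := (PySem.Str.count s substring : Int)
        if occurrences > 1 then repeat_score + (occurrences - 1) else repeat_score)
      0
  decide (repeat_score > 5)

-- ===== PORT B =====
def check_repetitive_patterns_alt (sequence : String) (min_repeat_length : Int) : Bool :=
  let s := PySem.Str.upper sequence
  let n := PySem.Str.len s
  let m := min_repeat_length
  let pos : PySem.Dict String (List Int) :=
    (PySem.List.pyRange 0 (n - m + 1) 1).foldl
      (fun d i => d.modify (PySem.Str.slice s (some i) (some (i + m))) [] (fun l => l ++ [i]))
      PySem.Dict.empty
  let score : Int :=
    pos.values.foldl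
      (fun score ps =>
        let cn := ps.foldl (fun cn p => if p ≥ cn.2 then (cn.1 + 1, p + m) else cn) ((0 : Int), (0 : Int))
        score + (ps.length : Int) * (cn.1 - 1))
      0
  decide (score > 5)

-- ===== PRECONDITION & SPEC =====
-- Pre_ restricts to the natural domain 0 <= min_repeat_length (a pattern length): for negative lengths
-- every slice A takes is empty and A's score is an artefact of how Python counts an empty pattern
-- (len+1 times), which B's position-based counting does not reproduce.
def Pre_check_repetitive_patterns (_sequence : String) (min_repeat_length : Int) : Prop :=
  0 ≤ min_repeat_length
instance (sequence : String) (min_repeat_length : Int) : Decidable (Pre_check_repetitive_patterns sequence min_repeat_length) := by unfold Pre_check_repetitive_patterns; infer_instance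
def pvWitness_check_repetitive_patterns : String × Int := ("ATATATATAT", 2)

def Spec_check_repetitive_patterns (sequence : String) (min_repeat_length : Int) (out : Bool) : Prop := out = check_repetitive_patterns_alt sequence min_repeat_length
instance (sequence : String) (min_repeat_length : Int) (out : Bool) : Decidable (Spec_check_repetitive_patterns sequence min_repeat_length out) := by unfold Spec_check_repetitive_patterns; infer_instance

-- ===== CLAIM (what is proved, stated in full; the proofs are below) =====
def Claim_equal_check_repetitive_patterns : Prop := ∀ (sequence : String) (min_repeat_length : Int), Dom_check_repetitive_patterns sequence min_repeat_length → Pre_check_repetitive_patterns sequence min_repeat_length → Spec_check_repetitive_patterns sequence min_repeat_length (check_repetitive_patterns sequence min_repeat_length)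

-- ===== LEMMAS AND PROOFS =====

-- structural non-overlapping substring count (meaningful for w ≠ [])
def pvGcount : List Char → List Char → Nat
  | _, [] => 0
  | [], _ :: _ => 0
  | (c :: w'), (h :: t) =>
      if (c :: w').isPrefixOf (h :: t) then 1 + pvGcount (c :: w') (List.drop w'.length t)
      else pvGcount (c :: w') t
termination_by _w l => l.length
decreasing_by
  · simp only [List.length_cons, List.length_drop]
    omega
  · simp

-- greedy non-overlapping count over Nat positions
def pvGcntN (m : Nat) : Nat → List Nat → Nat
  | _, [] => 0
  | nxt, p :: ps => if nxt ≤ p then 1 + pvGcntN m (p + m) ps else pvGcntN m nxt ps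

-- greedy count over Int positions (B's inner loop)
def pvGcnt (m : Int) : Int → List Int → Int
  | _, [] => 0
  | nxt, p :: ps => if p ≥ nxt then 1 + pvGcnt m (p + m) ps else pvGcnt m nxt ps

-- occurrence positions of w in l (all j with w a prefix of l.drop j)
def pvOcc (w : List Char) : List Char → List Nat
  | [] => if w.isPrefixOf [] then [0] else []
  | h :: t => (if w.isPrefixOf (h :: t) then [0] else []) ++ (pvOcc w t).map (· + 1)

theorem pvGcnt_fold (m : Int) (ps : List Int) (c0 nxt : Int) :
    (ps.foldl (fun cn p => if p ≥ cn.2 then (cn.1 + 1, p + m) else cn) (c0, nxt)).1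
      = c0 + pvGcnt m nxt ps := by
  induction ps generalizing c0 nxt with
  | nil => simp [pvGcnt]
  | cons p ps ih =>
    simp only [List.foldl_cons, pvGcnt]
    split_ifs with h
    · rw [ih]; ring
    · rw [ih]

theorem pvGcnt_cast (m nxt : Nat) (ps : List Nat) :
    pvGcnt (m : Int) (nxt : Int) (ps.map (fun j : Nat => (j : Int)))
      = (pvGcntN m nxt ps : Int) := by
  induction ps generalizing nxt with
  | nil => simp [pvGcnt, pvGcntN]
  | cons p ps ih =>
    simp only [List.map_cons, pvGcnt, pvGcntN]
    by_cases h : nxt ≤ p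
    · rw [if_pos (by exact_mod_cast h), if_pos h, ← Nat.cast_add, ih]
      push_cast; ring
    · rw [if_neg (by exact_mod_cast h), if_neg h, ih]

theorem pvGcntN_shift (m : Nat) (ps : List Nat) (nxt : Nat) :
    pvGcntN m (nxt + 1) (ps.map (· + 1)) = pvGcntN m nxt ps := by
  induction ps generalizing nxt with
  | nil => simp [pvGcntN]
  | cons p ps ih =>
    simp only [List.map_cons, pvGcntN]
    by_cases h : nxt ≤ p
    · rw [if_pos (by omega), if_pos h]
      have : p + 1 + m = (p + m) + 1 := by omega
      rw [this, ih]
    · rw [if_neg (by omega), if_neg h, ih]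

theorem pvGcntN_zero_map (m : Nat) (ps : List Nat) :
    pvGcntN m 0 (ps.map (· + 1)) = pvGcntN m 0 ps := by
  cases ps with
  | nil => simp [pvGcntN]
  | cons p ps =>
    simp only [List.map_cons, pvGcntN, if_pos (Nat.zero_le _)]
    have : p + 1 + m = (p + m) + 1 := by omega
    rw [this, pvGcntN_shift]

theorem pvOcc_nil_of_ne (w : List Char) (hw : w ≠ []) : pvOcc w [] = [] := by
  cases w with
  | nil => exact absurd rfl hw
  | cons c w' => simp [pvOcc]

theorem pvGcntN_skip (m : Nat) (w : List Char) (hw : w ≠ []) (l : List Char) (k : Nat) :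
    pvGcntN m (k + 1) (pvOcc w l) = pvGcntN m k (pvOcc w l.tail) := by
  cases l with
  | nil => simp [pvOcc_nil_of_ne w hw, pvGcntN]
  | cons h t =>
    simp only [pvOcc, List.tail_cons]
    split_ifs with hp
    · simp only [List.cons_append, List.nil_append, pvGcntN]
      rw [if_neg (by omega), pvGcntN_shift]
    · simp only [List.nil_append]
      rw [pvGcntN_shift]

theorem pvGcntN_drop (m : Nat) (w : List Char) (hw : w ≠ []) (k : Nat) (l : List Char) :
    pvGcntN m k (pvOcc w l) = pvGcntN m 0 (pvOcc w (l.drop k)) := by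
  induction k generalizing l with
  | zero => simp
  | succ k ih =>
    rw [pvGcntN_skip m w hw l k, ih l.tail]
    cases l <;> simp

theorem pvGcount_eq_gcnt (w : List Char) (hw : w ≠ []) :
    ∀ (n : Nat) (l : List Char), l.length ≤ n →
      pvGcount w l = pvGcntN w.length 0 (pvOcc w l) := by
  intro n
  induction n with
  | zero =>
    intro l hl
    have : l = [] := by cases l <;> simp_all
    subst this
    rw [pvOcc_nil_of_ne w hw]
    cases w with
    | nil => exact absurd rfl hw
    | cons c w' => simp [pvGcount, pvGcntN]
  | succ n ih =>
    intro l hl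
    cases l with
    | nil =>
      rw [pvOcc_nil_of_ne w hw]
      cases w with
      | nil => exact absurd rfl hw
      | cons c w' => simp [pvGcount, pvGcntN]
    | cons h t =>
      cases w with
      | nil => exact absurd rfl hw
      | cons c w' =>
        by_cases hp : (c :: w').isPrefixOf (h :: t)
        · have e1 : pvGcount (c :: w') (h :: t)
              = 1 + pvGcount (c :: w') (List.drop w'.length t) := by
            rw [pvGcount]; rw [if_pos hp]
          have e2 : pvOcc (c :: w') (h :: t)
              = 0 :: (pvOcc (c :: w') t).map (· + 1) := by
            simp [pvOcc, hp]
          rw [e1, e2]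
          simp only [pvGcntN, if_pos (Nat.zero_le _)]
          have hm : (0 : Nat) + (c :: w').length = w'.length + 1 := by simp
          rw [hm, pvGcntN_shift, pvGcntN_drop _ _ hw]
          have ht : (List.drop w'.length t).length ≤ n := by
            simp only [List.length_drop, List.length_cons] at hl ⊢
            omega
          rw [← ih (List.drop w'.length t) ht]
        · have e1 : pvGcount (c :: w') (h :: t) = pvGcount (c :: w') t := by
            rw [pvGcount]; rw [if_neg hp]
          have e2 : pvOcc (c :: w') (h :: t) = (pvOcc (c :: w') t).map (· + 1) := by
            simp [pvOcc, hp]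
          rw [e1, e2, pvGcntN_zero_map]
          exact ih t (by simp only [List.length_cons] at hl; omega)

theorem pvCount_go_eq (w : List Char) (hw : w ≠ []) :
    ∀ (fuel : Nat) (l : List Char) (acc : Nat), l.length ≤ fuel →
      PySem.Chars.count.go w fuel l acc = acc + pvGcount w l := by
  intro fuel
  induction fuel with
  | zero =>
    intro l acc hl
    have : l = [] := by cases l <;> simp_all
    subst this
    cases w with
    | nil => exact absurd rfl hw
    | cons c w' => simp [PySem.Chars.count.go, pvGcount]
  | succ fuel ih =>
    intro l acc hl
    cases l with
    | nil =>
      cases w with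
      | nil => exact absurd rfl hw
      | cons c w' => simp [PySem.Chars.count.go, pvGcount]
    | cons h t =>
      cases w with
      | nil => exact absurd rfl hw
      | cons c w' =>
        rw [PySem.Chars.count.go]
        by_cases hp : (c :: w').isPrefixOf (h :: t)
        · rw [if_pos hp]
          have hlen : (List.drop (c :: w').length (h :: t)).length ≤ fuel := by
            simp only [List.length_cons] at hl
            simp only [List.length_drop, List.length_cons]
            omega
          rw [ih _ _ hlen]
          have e1 : pvGcount (c :: w') (h :: t)
              = 1 + pvGcount (c :: w') (List.drop w'.length t) := by
            rw [pvGcount]; rw [if_pos hp]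
          have e2 : List.drop (c :: w').length (h :: t) = List.drop w'.length t := by
            simp [List.length_cons]
          rw [e2, e1]
          omega
        · rw [if_neg hp]
          rw [ih t acc (by simp only [List.length_cons] at hl; omega)]
          have e1 : pvGcount (c :: w') (h :: t) = pvGcount (c :: w') t := by
            rw [pvGcount]; rw [if_neg hp]
          rw [e1]

theorem pvGcntN_occ_nil (l : List Char) :
    pvGcntN 0 0 (pvOcc [] l) = l.length + 1 := by
  induction l with
  | nil => simp [pvOcc, pvGcntN, List.isPrefixOf]
  | cons h t ih =>
    have : ([] : List Char).isPrefixOf (h :: t) = true := by simp [List.isPrefixOf]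
    simp only [pvOcc, this, if_pos, List.cons_append, List.nil_append]
    simp only [pvGcntN, if_pos (Nat.zero_le _)]
    rw [Nat.zero_add, pvGcntN_zero_map]
    have h0 : pvGcntN 0 0 (pvOcc [] t) = t.length + 1 := ih
    simp [h0]
    omega

-- the greedy count over the occurrence positions IS Python's non-overlapping str.count
theorem pvCount_core (w l : List Char) :
    pvGcntN w.length 0 (pvOcc w l) = PySem.Chars.count l w := by
  cases hw : w with
  | nil =>
    simp only [List.length_nil]
    rw [pvGcntN_occ_nil]
    simp [PySem.Chars.count]
  | cons c w' =>
    have hne : (c :: w') ≠ ([] : List Char) := by simp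
    rw [← pvGcount_eq_gcnt (c :: w') hne l.length l le_rfl]
    have : PySem.Chars.count l (c :: w')
        = PySem.Chars.count.go (c :: w') l.length l 0 := by
      simp [PySem.Chars.count]
    rw [this, pvCount_go_eq (c :: w') hne l.length l 0 le_rfl]
    omega

-- pvOcc as a filtered range
theorem pvOcc_eq_filter_full (w : List Char) (l : List Char) :
    pvOcc w l = (List.range (l.length + 1)).filter (fun j => w.isPrefixOf (l.drop j)) := by
  induction l with
  | nil => cases w <;> simp [pvOcc, List.range_succ, List.isPrefixOf]
  | cons h t ih =>
    have hr : List.range ((h :: t).length + 1)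
        = 0 :: (List.range (t.length + 1)).map (· + 1) := by
      simp [List.length_cons, List.range_succ_eq_map, Nat.succ_eq_add_one]
    rw [hr, List.filter_cons, List.filter_map]
    have hc : ((fun j => w.isPrefixOf (List.drop j (h :: t))) ∘ (· + 1))
        = (fun j => w.isPrefixOf (List.drop j t)) := by
      funext j; simp
    rw [hc, ← ih]
    simp only [pvOcc, List.drop_zero]
    split_ifs with hp <;> simp

theorem pvOcc_eq_filter (w : List Char) (l : List Char) :
    pvOcc w l = (List.range (l.length + 1 - w.length)).filter (fun j => w.isPrefixOf (l.drop j)) := by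
  rw [pvOcc_eq_filter_full]
  by_cases hle : w.length ≤ l.length + 1
  · have hsplit : l.length + 1 = (l.length + 1 - w.length) + w.length := by omega
    conv_lhs => rw [hsplit, List.range_add]
    rw [List.filter_append]
    have : ((List.range w.length).map (fun k => l.length + 1 - w.length + k)).filter
        (fun j => w.isPrefixOf (l.drop j)) = [] := by
      rw [List.filter_eq_nil_iff]
      intro j hj
      simp only [List.mem_map, List.mem_range] at hj
      obtain ⟨k, hk, rfl⟩ := hj
      simp only [Bool.not_eq_true]
      rw [← Bool.not_eq_true, List.isPrefixOf_iff_prefix]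
      intro hpre
      have h1 := hpre.length_le
      simp only [List.length_drop] at h1
      omega
    rw [this, List.append_nil]
  · have h0 : l.length + 1 - w.length = 0 := by omega
    rw [h0]
    simp only [List.range_zero, List.filter_nil]
    rw [List.filter_eq_nil_iff]
    intro j hj
    simp only [List.mem_range] at hj
    simp only [Bool.not_eq_true]
    rw [← Bool.not_eq_true, List.isPrefixOf_iff_prefix]
    intro hpre
    have h1 := hpre.length_le
    simp only [List.length_drop] at h1
    omega

-- a fold that conditionally adds equals the sum of the conditional contributions
theorem pv_foldl_if_add {β : Type} (l : List β) (p : β → Prop) [DecidablePred p]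
    (g : β → Int) (c : Int) :
    l.foldl (fun a x => if p x then a + g x else a) c
      = c + (l.map (fun x => if p x then g x else 0)).sum := by
  induction l generalizing c with
  | nil => simp
  | cons x t ih =>
    simp only [List.foldl_cons, List.map_cons, List.sum_cons, ih]
    split_ifs <;> ring

-- summing a function over a list equals summing multiplicity × value over its distinct elements
theorem pv_group_sum (ws : List String) (f : String → Int) :
    ((PySem.Set.ofList ws).map (fun w => ((ws.count w : Int)) * f w)).sum
      = (ws.map f).sum := by
  have h1 := List.sum_toFinset (fun w => ((ws.count w : Int)) * f w) (PySem.Set.nodup_ofList ws)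
  have h2 : (PySem.Set.ofList ws : List String).toFinset = ws.toFinset := by
    ext x
    simp [List.mem_toFinset, PySem.Set.mem_ofList]
  rw [← h1, h2, Finset.sum_list_map_count]
  apply Finset.sum_congr rfl
  intro x _
  simp

-- pyRange with lower bound 0 and an Int upper bound n - m + 1 as a Nat range
theorem pvRange_nat (n mN : Nat) :
    PySem.List.pyRange 0 ((n : Int) - (mN : Int) + 1) 1
      = (List.range (n + 1 - mN)).map (fun k : Nat => (k : Int)) := by
  by_cases hle : mN ≤ n + 1
  · have : (n : Int) - (mN : Int) + 1 = ((n + 1 - mN : Nat) : Int) := by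
      push_cast [Nat.cast_sub hle]; ring
    rw [this]
    exact PySem.List.pyRange_zero_natCast _
  · have h0 : n + 1 - mN = 0 := by omega
    rw [h0]
    simp only [List.range_zero, List.map_nil]
    have : (n : Int) - (mN : Int) + 1 ≤ 0 := by omega
    simp [PySem.List.pyRange]
    omega

theorem pvGcntN_pos (m : Nat) (p : Nat) (ps : List Nat) :
    1 ≤ pvGcntN m 0 (p :: ps) := by
  simp only [pvGcntN, if_pos (Nat.zero_le _)]
  omega

-- ===== the main equality =====

theorem pvWin_toList (sU : String) (mN j : Nat) :
    (PySem.Str.slice sU (some (j : Int)) (some ((j : Int) + (mN : Int)))).toList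
      = (sU.toList.drop j).take mN := by
  rw [PySem.Str.toList_slice, PySem.Chars.slice_eq_listSlice]
  exact PySem.List.slice_natCast_add sU.toList j mN

theorem pvString_eq_of_toList {a b : String} (h : a.toList = b.toList) : a = b := by
  have := congrArg String.ofList h
  simpa using this

theorem pvCond (sU : String) (mN : Nat) (w : String) (hw : w.toList.length = mN) (j : Nat) :
    (PySem.Str.slice sU (some (j : Int)) (some ((j : Int) + (mN : Int))) == w)
      = w.toList.isPrefixOf (sU.toList.drop j) := by
  by_cases h : w.toList <+: (sU.toList.drop j)
  · have ht : (sU.toList.drop j).take mN = w.toList := by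
      have := List.prefix_iff_eq_take.mp h
      rw [hw] at this
      exact this.symm
    have hs : PySem.Str.slice sU (some (j : Int)) (some ((j : Int) + (mN : Int))) = w :=
      pvString_eq_of_toList (by rw [pvWin_toList, ht])
    rw [hs]
    simp [List.isPrefixOf_iff_prefix, h]
  · have hs : (PySem.Str.slice sU (some (j : Int)) (some ((j : Int) + (mN : Int))) == w) = false := by
      rw [beq_eq_false_iff_ne]
      intro he
      apply h
      have : (sU.toList.drop j).take mN = w.toList := by rw [← he, pvWin_toList]
      rw [← this]
      exact List.take_prefix mN _
    rw [hs]
    symm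
    rw [← Bool.not_eq_true, List.isPrefixOf_iff_prefix]
    exact h

theorem pvCount_window (sU : String) (mN : Nat) (w : String) (hw : w.toList.length = mN) :
    pvGcntN mN 0 ((List.range (sU.toList.length + 1 - mN)).filter
        (fun (j : Nat) => PySem.Str.slice sU (some (j : Int)) (some ((j : Int) + (mN : Int))) == w))
      = PySem.Str.count sU w := by
  have hfilt : (List.range (sU.toList.length + 1 - mN)).filter
        (fun (j : Nat) => PySem.Str.slice sU (some (j : Int)) (some ((j : Int) + (mN : Int))) == w)
      = pvOcc w.toList sU.toList := by
    rw [pvOcc_eq_filter, hw]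
    exact List.filter_congr (fun j _ => pvCond sU mN w hw j)
  rw [hfilt, ← hw, pvCount_core, PySem.Str.count_eq]

theorem pvWindow_mem_occ (sU : String) (mN j : Nat) (hj : j < sU.toList.length + 1 - mN) :
    j ∈ pvOcc (PySem.Str.slice sU (some (j : Int)) (some ((j : Int) + (mN : Int)))).toList sU.toList := by
  have hwl : (PySem.Str.slice sU (some (j : Int)) (some ((j : Int) + (mN : Int)))).toList
      = (sU.toList.drop j).take mN := pvWin_toList sU mN j
  have hlen : ((sU.toList.drop j).take mN).length = mN := by
    simp only [List.length_take, List.length_drop]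
    omega
  rw [pvOcc_eq_filter, hwl, hlen, List.mem_filter]
  refine ⟨List.mem_range.mpr hj, ?_⟩
  rw [List.isPrefixOf_iff_prefix]
  exact List.take_prefix mN _

theorem pvCount_window_pos (sU : String) (mN j : Nat) (hj : j < sU.toList.length + 1 - mN) :
    1 ≤ PySem.Str.count sU (PySem.Str.slice sU (some (j : Int)) (some ((j : Int) + (mN : Int)))) := by
  set w := PySem.Str.slice sU (some (j : Int)) (some ((j : Int) + (mN : Int))) with hwdef
  have hwl : w.toList.length = mN := by
    rw [hwdef, pvWin_toList]
    simp only [List.length_take, List.length_drop]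
    omega
  rw [← pvCount_window sU mN w hwl]
  have hfilt : (List.range (sU.toList.length + 1 - mN)).filter
        (fun (j' : Nat) => PySem.Str.slice sU (some (j' : Int)) (some ((j' : Int) + (mN : Int))) == w)
      = pvOcc w.toList sU.toList := by
    rw [pvOcc_eq_filter, hwl]
    exact List.filter_congr (fun j' _ => pvCond sU mN w hwl j')
  rw [hfilt]
  have hmem : j ∈ pvOcc w.toList sU.toList := pvWindow_mem_occ sU mN j hj
  cases hocc : pvOcc w.toList sU.toList with
  | nil => rw [hocc] at hmem; cases hmem
  | cons p ps => exact pvGcntN_pos mN p ps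

theorem pv_ports_eq (sequence : String) (min_repeat_length : Int)
    (hm : 0 ≤ min_repeat_length) :
    check_repetitive_patterns sequence min_repeat_length
      = check_repetitive_patterns_alt sequence min_repeat_length := by
  obtain ⟨mN, rfl⟩ : ∃ mN : Nat, min_repeat_length = (mN : Int) :=
    ⟨min_repeat_length.toNat, (Int.toNat_of_nonneg hm).symm⟩
  unfold check_repetitive_patterns check_repetitive_patterns_alt
  simp only []
  set sU := PySem.Str.upper sequence with hsU
  have hlen : PySem.Str.len sU = (sU.toList.length : Int) := by rw [PySem.Str.len_eq]
  rw [hlen, pvRange_nat sU.toList.length mN]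
  simp only [List.foldl_map]
  set n := sU.toList.length with hn
  set K := n + 1 - mN with hK
  set natRange := List.range K with hnatRange
  set winN : Nat → String :=
    fun j => PySem.Str.slice sU (some (j : Int)) (some ((j : Int) + (mN : Int))) with hwinN
  set ws : List String := natRange.map winN with hws
  set f : String → Int := fun w => ((PySem.Str.count sU w : Nat) : Int) - 1 with hf
  -- ===== A's score =====
  have hA : natRange.foldl
      (fun repeat_score j =>
        if ((PySem.Str.count sU (winN j) : Nat) : Int) > 1
        then repeat_score + (((PySem.Str.count sU (winN j) : Nat) : Int) - 1)
        else repeat_score) 0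
      = (ws.map f).sum := by
    rw [pv_foldl_if_add natRange
        (fun j => ((PySem.Str.count sU (winN j) : Nat) : Int) > 1)
        (fun j => ((PySem.Str.count sU (winN j) : Nat) : Int) - 1) 0]
    rw [zero_add, hws, List.map_map]
    congr 1
    apply List.map_congr_left
    intro j hj
    rw [hnatRange, List.mem_range] at hj
    have hpos := pvCount_window_pos sU mN j (by rw [hK, hn] at hj; exact hj)
    simp only [Function.comp, hf]
    split_ifs with h1
    · rfl
    · have h2 : PySem.Str.count sU (PySem.Str.slice sU (some (j : Int)) (some ((j : Int) + (mN : Int)))) = 1 := by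
        simp only [hwinN] at h1 hpos
        omega
      rw [h2]
      norm_num
  -- ===== B's dict =====
  set d := natRange.foldl
      (fun d j => d.modify (winN j) [] (fun l => l ++ [(j : Int)])) PySem.Dict.empty with hd
  have hkeys : d.keys = PySem.Set.ofList ws := by
    rw [hd, PySem.Dict.keys_foldl_modify_key natRange winN [] (fun d j => (fun l => l ++ [(j : Int)]))]
    rfl
  have hnodup : d.keys.Nodup := by
    rw [hkeys]
    exact PySem.Set.nodup_ofList ws
  have hgetD : ∀ w, d.getD w []
      = (natRange.filter (fun j => winN j == w)).map (fun k : Nat => (k : Int)) := by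
    intro w
    have hfold : d = (natRange.map (fun j => (winN j, (j : Int)))).foldl
        (fun d p => d.modify p.1 [] (fun l => l ++ [p.2])) PySem.Dict.empty := by
      rw [hd, List.foldl_map]
    rw [hfold, PySem.Dict.getD_foldl_modify_append]
    rw [List.filter_map, List.map_map]
    simp only [Function.comp_def]
    rw [show (PySem.Dict.empty : PySem.Dict String (List Int)).getD w [] = [] from rfl,
      List.nil_append]
  have hvalues : d.values = (PySem.Set.ofList ws).map
      (fun w => (natRange.filter (fun j => winN j == w)).map (fun k : Nat => (k : Int))) := by
    rw [PySem.Dict.values_eq_map_keys d hnodup [], hkeys]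
    apply List.map_congr_left
    intro w _
    exact hgetD w
  -- ===== B's score =====
  have hB : d.values.foldl
      (fun score ps =>
        score + (ps.length : Int) *
          ((ps.foldl (fun cn p => if p ≥ cn.2 then (cn.1 + 1, p + ((mN : Nat) : Int)) else cn)
              ((0 : Int), (0 : Int))).1 - 1)) 0
      = (ws.map f).sum := by
    rw [PySem.List.foldl_add
        (g := fun ps : List Int => (ps.length : Int) *
          ((ps.foldl (fun cn p => if p ≥ cn.2 then (cn.1 + 1, p + ((mN : Nat) : Int)) else cn)
              ((0 : Int), (0 : Int))).1 - 1))]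
    rw [zero_add, hvalues, List.map_map, ← pv_group_sum ws f]
    congr 1
    apply List.map_congr_left
    intro w hw
    have hwin : ∃ j, j < K ∧ winN j = w := by
      rw [PySem.Set.mem_ofList, hws, List.mem_map] at hw
      obtain ⟨j, hj, rfl⟩ := hw
      rw [hnatRange, List.mem_range] at hj
      exact ⟨j, hj, rfl⟩
    obtain ⟨j0, hj0, hw0⟩ := hwin
    have hwlen : w.toList.length = mN := by
      rw [← hw0, hwinN, pvWin_toList]
      simp only [List.length_take, List.length_drop]
      rw [hK, hn] at hj0
      omega
    simp only [Function.comp]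
    rw [pvGcnt_fold ((mN : Nat) : Int) _ 0 0, zero_add]
    have hcast := pvGcnt_cast mN 0 (natRange.filter (fun j => winN j == w))
    simp only [Nat.cast_zero] at hcast
    rw [hcast]
    have hcnt : pvGcntN mN 0 (natRange.filter (fun j => winN j == w))
        = PySem.Str.count sU w := by
      rw [← pvCount_window sU mN w hwlen]
    rw [hcnt]
    have hmult : ((natRange.filter (fun j => winN j == w)).map (fun k : Nat => (k : Int))).length
        = ws.count w := by
      rw [List.length_map, ← List.countP_eq_length_filter]
      rw [hws, List.count_eq_countP, List.countP_map]
      rfl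
    rw [hmult, hf]
  rw [hA, hB]

-- ===== VERDICT (by name: the statement is the Claim_ definition above) =====
theorem check_repetitive_patterns_spec : Claim_equal_check_repetitive_patterns := by
  intro sequence min_repeat_length _ hpre
  unfold Spec_check_repetitive_patterns
  exact pv_ports_eq sequence min_repeat_length hpre
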